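-- pv_equiv track=rewrite | github.com/Aakanshakowerjani/Competitive-Programming | factors.py | fctr
-- ===== SOURCE A (Python) =====
-- def ispm(n1):
--     if n1<=1:
--         return False
--     if n1<=3:
--         return True
--     if n1% 2 == 0 or n1 % 3 == 0:
--         return False
--     j = 5
--     while j*j <= n1:
--         if n1%j == 0 or n1% (j+2) == 0:
--             return False
--         j = j + 6
--     return True
--
-- def fctr(number):
--     value = 1
--     c=0
--     c1=0
--     while (value <= number):
--         if(number % value == 0):
--             if ispm(value):
--                 c1+=1
--             c+=1
--         value = value + 1
--     return c1,c
-- ===== SOURCE B (Python) =====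
-- def ispm(n1):
--     if n1 <= 1:
--         return False
--     if n1 <= 3:
--         return True
--     if n1 % 2 == 0 or n1 % 3 == 0:
--         return False
--     j = 5
--     while j * j <= n1:
--         if n1 % j == 0 or n1 % (j + 2) == 0:
--             return False
--         j = j + 6
--     return True
--
-- def fctr(number):
--     c1 = 0
--     c = 0
--     d = 1
--     while d * d <= number:
--         if number % d == 0:
--             e = number // d
--             if e == d:
--                 c += 1
--             else:
--                 c += 2
--             if ispm(d):
--                 c1 += 1
--             if e != d and ispm(e):
--                 c1 += 1
--         d = d + 1
--     return c1, c
-- ===== Notes on version B (the rewrite author's own statement) =====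
-- stated objective: faster
-- what changed: B scans only d with d*d <= number and counts each divisor pair (d, number//d) at once (testing primality of both members), replacing A's full 1..number scan.
import Mathlib
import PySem

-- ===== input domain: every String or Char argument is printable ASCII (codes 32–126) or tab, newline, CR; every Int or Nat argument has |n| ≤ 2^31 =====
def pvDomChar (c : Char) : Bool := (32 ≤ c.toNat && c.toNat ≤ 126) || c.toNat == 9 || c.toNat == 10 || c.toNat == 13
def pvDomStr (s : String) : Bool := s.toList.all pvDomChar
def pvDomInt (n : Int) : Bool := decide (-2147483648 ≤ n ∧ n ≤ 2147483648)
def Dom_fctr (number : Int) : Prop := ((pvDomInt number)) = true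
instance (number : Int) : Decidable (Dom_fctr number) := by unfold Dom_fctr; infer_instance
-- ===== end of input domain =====

-- B replaces A's full 1..number scan by a d*d ≤ number scan counting each divisor pair (d, number//d) at once (objective: faster).

-- ===== PORT A =====
-- helper ispm: shared verbatim by Source A and Source B; its while loop, j runs 5, 11, 17, …
def ispmLoop (n1 : Int) (j : Nat) : Bool :=
  if (j : Int) * (j : Int) ≤ n1 then
    if PySem.Int.mod n1 (j : Int) == 0 || PySem.Int.mod n1 ((j : Int) + 2) == 0 then false
    else ispmLoop n1 (j + 6)
  else true
termination_by (n1 + 1 - (j : Int)).toNat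
decreasing_by
  have hjj : (j : Nat) ≤ j * j := by
    cases j with
    | zero => simp
    | succ k => exact Nat.le_mul_of_pos_right _ (Nat.succ_pos k)
  have : ((j : Int)) ≤ (j : Int) * (j : Int) := by exact_mod_cast hjj
  omega

def ispm (n1 : Int) : Bool :=
  if n1 ≤ 1 then false
  else if n1 ≤ 3 then true
  else if PySem.Int.mod n1 2 == 0 || PySem.Int.mod n1 3 == 0 then false
  else ispmLoop n1 5

-- A's while loop: value runs 1, 2, …, number
def fctrLoop (number : Int) (value : Nat) (c1 c : Int) : List Int :=
  if (value : Int) ≤ number then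
    if PySem.Int.mod number (value : Int) == 0 then
      if ispm (value : Int) then fctrLoop number (value + 1) (c1 + 1) (c + 1)
      else fctrLoop number (value + 1) c1 (c + 1)
    else fctrLoop number (value + 1) c1 c
  else [c1, c]
termination_by (number + 1 - (value : Int)).toNat
decreasing_by all_goals omega

def fctr (number : Int) : List Int := fctrLoop number 1 0 0

-- ===== PORT B =====
-- B's while loop: d runs 1, 2, … while d*d ≤ number, handling the divisor pair (d, number//d)
def fctrAltLoop (number : Int) (d : Nat) (c1 c : Int) : List Int :=
  if (d : Int) * (d : Int) ≤ number then
    if PySem.Int.mod number (d : Int) == 0 then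
      let e : Int := PySem.Int.floordiv number (d : Int)
      let c' : Int := if e == (d : Int) then c + 1 else c + 2
      let c1' : Int := c1 + (if ispm (d : Int) then 1 else 0)
      let c1'' : Int := c1' + (if e != (d : Int) && ispm e then 1 else 0)
      fctrAltLoop number (d + 1) c1'' c'
    else fctrAltLoop number (d + 1) c1 c
  else [c1, c]
termination_by (number + 1 - (d : Int)).toNat
decreasing_by
  all_goals {
    have hjj : (d : Nat) ≤ d * d := by
      cases d with
      | zero => simp
      | succ k => exact Nat.le_mul_of_pos_right _ (Nat.succ_pos k)
    have : ((d : Int)) ≤ (d : Int) * (d : Int) := by exact_mod_cast hjj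
    omega }

def fctr_alt (number : Int) : List Int := fctrAltLoop number 1 0 0

-- ===== PRECONDITION & SPEC =====
def Spec_fctr (number : Int) (out : List Int) : Prop := out = fctr_alt number
instance (number : Int) (out : List Int) : Decidable (Spec_fctr number out) := by unfold Spec_fctr; infer_instance

-- ===== CLAIM (what is proved, stated in full; the proofs are below) =====
def Claim_equal_fctr : Prop := ∀ (number : Int), Dom_fctr number → Spec_fctr number (fctr number)

-- ===== LEMMAS AND PROOFS =====

-- A's condition "number % value == 0" is divisibility
theorem pvMod_eq (N v : Nat) : (PySem.Int.mod (N : Int) (v : Int) == 0) = decide (v ∣ N) := by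
  by_cases hdvd : v ∣ N
  · have h0 : PySem.Int.mod (N : Int) (v : Int) = 0 :=
      (PySem.Int.mod_eq_zero_iff_dvd _ _).2 (Int.natCast_dvd_natCast.2 hdvd)
    simp [h0, hdvd]
  · have h0 : PySem.Int.mod (N : Int) (v : Int) ≠ 0 := fun h0 =>
      hdvd (Int.natCast_dvd_natCast.1 ((PySem.Int.mod_eq_zero_iff_dvd _ _).1 h0))
    rw [decide_eq_false hdvd]
    exact beq_eq_false_iff_ne.2 h0

theorem pvCardFilterInsert (v : Nat) (s : Finset Nat) (h : v ∉ s) (p : Nat → Prop) [DecidablePred p] :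
    ((insert v s).filter p).card = (if p v then 1 else 0) + (s.filter p).card := by
  rw [Finset.filter_insert]
  split_ifs with hp
  · rw [Finset.card_insert_of_notMem (fun hm => h (Finset.mem_filter.1 hm).1)]
    omega
  · omega

-- invariant of A's loop: remaining iterations count (prime) divisors in [value, N]
theorem fctrLoop_eq (N v : Nat) (c1 c : Int) :
    fctrLoop (N : Int) v c1 c =
      [c1 + (((Finset.Icc v N).filter (fun k => k ∣ N ∧ ispm (k : Int) = true)).card : Int),
       c + (((Finset.Icc v N).filter (fun k => k ∣ N)).card : Int)] := by
  rw [fctrLoop]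
  by_cases h : (v : Int) ≤ (N : Int)
  · have hvN : v ≤ N := by exact_mod_cast h
    have hIcc : Finset.Icc v N = insert v (Finset.Icc (v + 1) N) := by
      ext x
      simp only [Finset.mem_Icc, Finset.mem_insert]
      omega
    have hnm : v ∉ Finset.Icc (v + 1) N := by simp
    rw [if_pos h, pvMod_eq, hIcc,
        pvCardFilterInsert v _ hnm (fun k => k ∣ N ∧ ispm (k : Int) = true),
        pvCardFilterInsert v _ hnm (fun k => k ∣ N)]
    by_cases hdvd : v ∣ N
    · by_cases hpm : ispm (v : Int) = true
      · rw [if_pos (by simpa using hdvd), if_pos hpm, fctrLoop_eq N (v + 1)]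
        simp [hdvd, hpm]
        all_goals omega
      · rw [if_pos (by simpa using hdvd), if_neg hpm, fctrLoop_eq N (v + 1)]
        simp [hdvd, hpm]
        all_goals omega
    · rw [if_neg (by simpa using hdvd), fctrLoop_eq N (v + 1)]
      simp [hdvd]
  · have hvN : N < v := by omega
    have : Finset.Icc v N = ∅ := Finset.Icc_eq_empty (by omega)
    rw [if_neg h, this]
    simp
termination_by N + 1 - v
decreasing_by all_goals omega

-- the set of divisors B's loop has not yet handled when the counter is d
def pvT (N d : Nat) : Finset Nat := N.divisors.filter (fun k => d ≤ k ∧ d ≤ N / k)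

theorem pvT_one (N : Nat) : pvT N 1 = N.divisors := by
  unfold pvT
  ext k
  simp only [Finset.mem_filter, Nat.mem_divisors, and_iff_left_iff_imp]
  rintro ⟨hk, hN⟩
  have hk0 : 0 < k := Nat.pos_of_dvd_of_pos hk (Nat.pos_of_ne_zero hN)
  exact ⟨hk0, (Nat.one_le_div_iff hk0).2 (Nat.le_of_dvd (Nat.pos_of_ne_zero hN) hk)⟩

theorem pvT_empty (N d : Nat) (h : N < d * d) : pvT N d = ∅ := by
  unfold pvT
  ext k
  simp only [Finset.mem_filter, Nat.mem_divisors, Finset.notMem_empty, iff_false]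
  rintro ⟨⟨hk, hN⟩, hdk, hdq⟩
  have h1 : d * d ≤ k * (N / k) := Nat.mul_le_mul hdk hdq
  have h2 : k * (N / k) ≤ N := by
    rw [Nat.mul_comm]
    exact Nat.div_mul_le_self N k
  omega

theorem pvT_step_skip (N d : Nat) (hdvd : ¬ d ∣ N) : pvT N d = pvT N (d + 1) := by
  unfold pvT
  ext k
  simp only [Finset.mem_filter, Nat.mem_divisors]
  constructor
  · rintro ⟨⟨hk, hN⟩, hdk, hdq⟩
    have hkd : k ≠ d := fun he => hdvd (he ▸ hk)
    have hqd : N / k ≠ d := by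
      intro he
      exact hdvd (he ▸ Nat.div_dvd_of_dvd hk)
    exact ⟨⟨hk, hN⟩, by omega, by omega⟩
  · rintro ⟨⟨hk, hN⟩, hdk, hdq⟩
    exact ⟨⟨hk, hN⟩, by omega, by omega⟩

theorem pvT_step (N d : Nat) (hd : 1 ≤ d) (hsq : d * d ≤ N) (hdvd : d ∣ N) :
    pvT N d = insert d (insert (N / d) (pvT N (d + 1))) := by
  have hN : 0 < N := by nlinarith
  have hmul : d * (N / d) = N := Nat.mul_div_cancel' hdvd
  have hdm : d ≤ N / d := Nat.le_of_mul_le_mul_left (by rw [hmul]; exact hsq) (by omega)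
  have hNm : N / (N / d) = d := Nat.div_div_self hdvd (by omega)
  unfold pvT
  ext k
  simp only [Finset.mem_filter, Nat.mem_divisors, Finset.mem_insert]
  constructor
  · rintro ⟨⟨hk, hN0⟩, hdk, hdq⟩
    by_cases hkd : k = d
    · exact Or.inl hkd
    by_cases hkm : k = N / d
    · exact Or.inr (Or.inl hkm)
    have hqd : N / k ≠ d := by
      intro he
      apply hkm
      have := Nat.div_div_self hk hN0
      rw [he] at this
      omega
    exact Or.inr (Or.inr ⟨⟨hk, hN0⟩, by omega, by omega⟩)
  · rintro (h1 | h1 | ⟨⟨hk, hN0⟩, hdk, hdq⟩)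
    · rw [h1]
      exact ⟨⟨hdvd, by omega⟩, le_refl d, hdm⟩
    · rw [h1]
      exact ⟨⟨Nat.div_dvd_of_dvd hdvd, by omega⟩, hdm, hNm.ge⟩
    · exact ⟨⟨hk, hN0⟩, by omega, by omega⟩

theorem pvDiv_not_mem_succ (N d : Nat) (hdvd : d ∣ N) (hN : 0 < N) : N / d ∉ pvT N (d + 1) := by
  intro hm
  unfold pvT at hm
  simp only [Finset.mem_filter, Nat.mem_divisors] at hm
  obtain ⟨_, _, hq⟩ := hm
  have hNm : N / (N / d) = d := Nat.div_div_self hdvd hN.ne'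
  omega

theorem pvD_not_mem (N d : Nat) (s : Finset Nat) (hs : s ⊆ pvT N (d + 1)) : d ∉ s := by
  intro hm
  have := hs hm
  unfold pvT at this
  simp only [Finset.mem_filter] at this
  omega

-- invariant of B's loop: remaining iterations count the still-unhandled divisor pairs
theorem fctrAltLoop_eq (N d : Nat) (hd : 1 ≤ d) (c1 c : Int) :
    fctrAltLoop (N : Int) d c1 c =
      [c1 + (((pvT N d).filter (fun k : Nat => ispm (k : Int) = true)).card : Int),
       c + ((pvT N d).card : Int)] := by
  rw [fctrAltLoop]
  by_cases h : (d : Int) * (d : Int) ≤ (N : Int)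
  · have hsq : d * d ≤ N := by exact_mod_cast h
    rw [if_pos h, pvMod_eq]
    by_cases hdvd : d ∣ N
    · rw [if_pos (by simpa using hdvd)]
      have hN : 0 < N := by nlinarith
      have he : PySem.Int.floordiv (N : Int) (d : Int) = ((N / d : Nat) : Int) :=
        PySem.Int.floordiv_natCast N d
      have hstep := pvT_step N d hd hsq hdvd
      have hmem1 : N / d ∉ pvT N (d + 1) := pvDiv_not_mem_succ N d hdvd hN
      have hsub : pvT N (d + 1) ⊆ pvT N d := by
        intro x hx
        unfold pvT at hx ⊢
        simp only [Finset.mem_filter] at hx ⊢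
        exact ⟨hx.1, by omega, by omega⟩
      by_cases hed : N / d = d
      · -- perfect square: only one new divisor d
        have hins : pvT N d = insert d (pvT N (d + 1)) := by
          rw [hstep, hed, Finset.insert_idem]
        have hdnm : d ∉ pvT N (d + 1) := by simpa [hed] using hmem1
        rw [fctrAltLoop_eq N (d + 1) (by omega), hins,
            pvCardFilterInsert d (pvT N (d + 1)) hdnm (fun k : Nat => ispm (k : Int) = true),
            Finset.card_insert_of_notMem hdnm]
        simp [he, hed]
        all_goals split_ifs <;> omega
      · -- two new divisors d and N / d
        have hdm : d ≤ N / d := Nat.le_of_mul_le_mul_left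
          (le_trans hsq (by rw [Nat.mul_div_cancel' hdvd])) (by omega)
        have hdnm : d ∉ insert (N / d) (pvT N (d + 1)) := by
          intro hm
          rcases Finset.mem_insert.1 hm with h1 | h1
          · exact hed h1.symm
          · exact pvD_not_mem N d _ (Finset.Subset.refl _) h1
        have hne2 : ¬ ((N : Int) / (d : Int) = (d : Int)) := by
          rw [← Int.natCast_div]
          exact fun hc => hed (by exact_mod_cast hc)
        rw [fctrAltLoop_eq N (d + 1) (by omega), hstep,
            pvCardFilterInsert d (insert (N / d) (pvT N (d + 1))) hdnm (fun k : Nat => ispm (k : Int) = true),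
            pvCardFilterInsert (N / d) (pvT N (d + 1)) hmem1 (fun k : Nat => ispm (k : Int) = true),
            Finset.card_insert_of_notMem hdnm, Finset.card_insert_of_notMem hmem1]
        simp [he, hne2]
        all_goals split_ifs <;> omega
    · rw [if_neg (by simpa using hdvd), fctrAltLoop_eq N (d + 1) (by omega),
          pvT_step_skip N d hdvd]
  · have hlt : N < d * d := by
      by_contra hcon
      exact h (by exact_mod_cast Nat.le_of_not_lt hcon)
    rw [if_neg h, pvT_empty N d hlt]
    simp
termination_by N + 1 - d
decreasing_by
  all_goals {
    have hjj : (d : Nat) ≤ d * d := Nat.le_mul_of_pos_right _ (by omega)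
    omega }

theorem pvIcc_filter_divisors (N : Nat) (hN : 1 ≤ N) :
    (Finset.Icc 1 N).filter (fun k => k ∣ N) = N.divisors := by
  ext k
  simp only [Finset.mem_filter, Finset.mem_Icc, Nat.mem_divisors]
  constructor
  · rintro ⟨⟨h1, h2⟩, hk⟩
    exact ⟨hk, by omega⟩
  · rintro ⟨hk, hN0⟩
    exact ⟨⟨Nat.pos_of_dvd_of_pos hk (by omega), Nat.le_of_dvd (by omega) hk⟩, hk⟩

theorem pvIcc_filter_prime_divisors (N : Nat) (hN : 1 ≤ N) :
    (Finset.Icc 1 N).filter (fun k => k ∣ N ∧ ispm (k : Int) = true) =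
      N.divisors.filter (fun k : Nat => ispm (k : Int) = true) := by
  ext k
  simp only [Finset.mem_filter, Finset.mem_Icc, Nat.mem_divisors]
  constructor
  · rintro ⟨⟨h1, h2⟩, hk, hp⟩
    exact ⟨⟨hk, by omega⟩, hp⟩
  · rintro ⟨⟨hk, hN0⟩, hp⟩
    exact ⟨⟨Nat.pos_of_dvd_of_pos hk (by omega), Nat.le_of_dvd (by omega) hk⟩, hk, hp⟩

theorem fctr_eq_alt (number : Int) : fctr number = fctr_alt number := by
  by_cases hn : 1 ≤ number
  · obtain ⟨N, rfl⟩ : ∃ N : Nat, number = (N : Int) :=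
      ⟨number.toNat, (Int.toNat_of_nonneg (by omega)).symm⟩
    have hN : 1 ≤ N := by exact_mod_cast hn
    rw [fctr, fctr_alt, fctrLoop_eq, fctrAltLoop_eq N 1 (le_refl 1), pvT_one,
        pvIcc_filter_divisors N hN, pvIcc_filter_prime_divisors N hN]
  · rw [fctr, fctr_alt, fctrLoop, fctrAltLoop]
    have h1 : ¬ ((1 : Nat) : Int) ≤ number := by push_cast; omega
    have h2 : ¬ ((1 : Nat) : Int) * ((1 : Nat) : Int) ≤ number := by push_cast; omega
    rw [if_neg h1, if_neg h2]

-- ===== VERDICT (by name: the statement is the Claim_ definition above) =====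
theorem fctr_spec : Claim_equal_fctr := by
  intro number _
  unfold Spec_fctr
  exact fctr_eq_alt number
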